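-- pv_equiv track=rewrite | github.com/irisapei/Mahjong | peng.py | ispeng
-- ===== SOURCE A (Python) =====
-- def ispeng(lst, givenTile):
--     wanTiles, tiaoTiles, bingTiles, characters = [], [], [], []
--     for tile in lst:
--         if "wan" in tile: wanTiles.append(tile)
--         elif "tiao" in tile: tiaoTiles.append(tile)
--         elif "bing" in tile: bingTiles.append(tile)
--         else: characters.append(tile)
--     if givenTile != None:
--     #peng for the wan tiles
--         if len(wanTiles)> 2:
--             seenWan = set()
--             for wan in wanTiles:
--                 if wan not in seenWan: seenWan.add(wan)
--                 for i in seenWan: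
--                     if wanTiles.count(i)==2:
--                         if "wan" in givenTile:
--                             if givenTile == i: return True
--                             else: continue
--         #peng for the tiao tiles
--         if len(tiaoTiles)> 2:
--             seenTiao = set()
--             for tiao in tiaoTiles:
--                 if tiao not in seenTiao: seenTiao.add(tiao)
--                 for i in seenTiao:
--                     if tiaoTiles.count(i) == 2:
--                         if "tiao" in givenTile:
--                             if givenTile == i: return True
--                             else: continue
--         #peng for the bing tiles
--         if len(bingTiles)> 2:
--             seenBing = set()
--             for bing in bingTiles:
--                 if bing not in seenBing: seenBing.add(bing)
--                 for i in seenBing: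
--                     if bingTiles.count(i)==2:
--                         if "bing" in givenTile:
--                             if givenTile == i:
--                                 if bingTiles.count(i) ==2: return True
--                         else:continue
--         #peng for character tiles
--         if len(characters)> 2:
--             seenChar = set()
--             for char in characters:
--                 if char not in seenChar: seenChar.add(char)
--                 for i in seenChar:
--                     if characters.count(i)==2:
--                         if givenTile == i: return True
--     return False
-- ===== SOURCE B (Python) =====
-- def ispeng(lst, givenTile):
--     # One pass: classify givenTile into its suit, count same-suit tiles and exact copies.
--     if givenTile is None:
--         return False
--     def suit(t):
--         if "wan" in t: return 0
--         if "tiao" in t: return 1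
--         if "bing" in t: return 2
--         return 3
--     s = suit(givenTile)
--     total = 0
--     gcount = 0
--     for tile in lst:
--         if suit(tile) == s:
--             total += 1
--         if tile == givenTile:
--             gcount += 1
--     return total > 2 and gcount == 2
-- ===== Notes on version B (the rewrite author's own statement) =====
-- stated objective: simpler
-- what changed: A buckets the hand into four suit lists and, per bucket, runs a quadratic seen-set loop with repeated list.count scans; B classifies givenTile's suit once and does a single counting pass over the hand (same-suit total and exact-copy count), returning total > 2 and copies == 2.
import Mathlib
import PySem

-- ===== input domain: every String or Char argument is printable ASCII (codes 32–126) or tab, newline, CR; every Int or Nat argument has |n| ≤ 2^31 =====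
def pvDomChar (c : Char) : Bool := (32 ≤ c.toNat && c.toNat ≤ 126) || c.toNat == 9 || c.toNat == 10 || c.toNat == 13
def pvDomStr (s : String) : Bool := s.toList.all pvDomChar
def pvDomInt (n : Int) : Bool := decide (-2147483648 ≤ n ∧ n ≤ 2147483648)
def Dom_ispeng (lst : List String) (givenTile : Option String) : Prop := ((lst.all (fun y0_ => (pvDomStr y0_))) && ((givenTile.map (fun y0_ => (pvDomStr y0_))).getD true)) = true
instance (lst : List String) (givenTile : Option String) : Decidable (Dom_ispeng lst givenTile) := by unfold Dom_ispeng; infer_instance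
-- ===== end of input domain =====

-- B replaces A's four bucket lists and per-bucket seen-set scans by one counting pass over the
-- hand keyed on givenTile's suit (objective: simpler; no speed claim).

-- ===== PORT A =====
-- 'if "wan" in tile: wanTiles.append(tile) elif "tiao" ... elif "bing" ... else ...'
def bucketStep (s : List String × List String × List String × List String) (tile : String) :
    List String × List String × List String × List String :=
  if PySem.Str.isIn "wan" tile then (s.1 ++ [tile], s.2.1, s.2.2.1, s.2.2.2)
  else if PySem.Str.isIn "tiao" tile then (s.1, s.2.1 ++ [tile], s.2.2.1, s.2.2.2)
  else if PySem.Str.isIn "bing" tile then (s.1, s.2.1, s.2.2.1 ++ [tile], s.2.2.2)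
  else (s.1, s.2.1, s.2.2.1, s.2.2.2 ++ [tile])

-- A's four nearly identical 'seen'-set block loops share one shape; pengLoop transcribes that
-- shape once and each block instantiates it with its own literal condition.
def pengLoop (cond : String → Bool) : List String → PySem.Set String → Bool
  | [], _ => false
  | w :: rest, seen =>
    let seen' := PySem.Set.add seen w          -- 'if w not in seen: seen.add(w)'
    if seen'.any cond then true                -- 'for i in seen: if cond(i): return True'
    else pengLoop cond rest seen'

-- the body after bucketing: the four guarded blocks in A's order (bing's redundant second
-- count check and the character block's missing substring check are kept verbatim)
def ispengCore (wanTiles tiaoTiles bingTiles characters : List String) (g : String) : Bool :=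
  if wanTiles.length > 2 &&
      pengLoop (fun i => (wanTiles.count i == 2) && PySem.Str.isIn "wan" g && (g == i)) wanTiles [] then true
  else if tiaoTiles.length > 2 &&
      pengLoop (fun i => (tiaoTiles.count i == 2) && PySem.Str.isIn "tiao" g && (g == i)) tiaoTiles [] then true
  else if bingTiles.length > 2 &&
      pengLoop (fun i => (bingTiles.count i == 2) && PySem.Str.isIn "bing" g && (g == i) && (bingTiles.count i == 2)) bingTiles [] then true
  else if characters.length > 2 &&
      pengLoop (fun i => (characters.count i == 2) && (g == i)) characters [] then true
  else false

def ispeng (lst : List String) (givenTile : Option String) : Bool :=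
  let buckets := lst.foldl bucketStep ([], [], [], [])
  match givenTile with
  | none => false
  | some g => ispengCore buckets.1 buckets.2.1 buckets.2.2.1 buckets.2.2.2 g

-- ===== PORT B =====
def suitOf (t : String) : Nat :=
  if PySem.Str.isIn "wan" t then 0
  else if PySem.Str.isIn "tiao" t then 1
  else if PySem.Str.isIn "bing" t then 2
  else 3

def countStep (s : Nat) (g : String) (p : Int × Int) (tile : String) : Int × Int :=
  ((if suitOf tile == s then p.1 + 1 else p.1), (if tile == g then p.2 + 1 else p.2))

def ispeng_alt (lst : List String) (givenTile : Option String) : Bool :=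
  match givenTile with
  | none => false
  | some g =>
    let s := suitOf g
    let p := lst.foldl (countStep s g) (0, 0)
    decide (p.1 > 2) && (p.2 == 2)

-- ===== PRECONDITION & SPEC =====
def Spec_ispeng (lst : List String) (givenTile : Option String) (out : Bool) : Prop := out = ispeng_alt lst givenTile
instance (lst : List String) (givenTile : Option String) (out : Bool) : Decidable (Spec_ispeng lst givenTile out) := by unfold Spec_ispeng; infer_instance

-- ===== CLAIM (what is proved, stated in full; the proofs are below) =====
def Claim_equal_ispeng : Prop := ∀ (lst : List String) (givenTile : Option String), Dom_ispeng lst givenTile → Spec_ispeng lst givenTile (ispeng lst givenTile)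

-- ===== LEMMAS AND PROOFS =====

-- the bucket-building foldl is four filters (by suit number)
lemma buckets_eq (lst : List String) (w t b c : List String) :
    lst.foldl bucketStep (w, t, b, c) =
    (w ++ lst.filter (fun x => suitOf x == 0),
     t ++ lst.filter (fun x => suitOf x == 1),
     b ++ lst.filter (fun x => suitOf x == 2),
     c ++ lst.filter (fun x => suitOf x == 3)) := by
  induction lst generalizing w t b c with
  | nil => simp
  | cons hd tl ih =>
    simp only [List.foldl_cons, List.filter_cons]
    by_cases h1 : PySem.Str.isIn "wan" hd = true
    · rw [show bucketStep (w, t, b, c) hd = (w ++ [hd], t, b, c) from by unfold bucketStep; rw [if_pos h1],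
        ih, show suitOf hd = 0 from by unfold suitOf; rw [if_pos h1]]
      simp
    · by_cases h2 : PySem.Str.isIn "tiao" hd = true
      · rw [show bucketStep (w, t, b, c) hd = (w, t ++ [hd], b, c) from by unfold bucketStep; rw [if_neg h1, if_pos h2],
          ih, show suitOf hd = 1 from by unfold suitOf; rw [if_neg h1, if_pos h2]]
        simp
      · by_cases h3 : PySem.Str.isIn "bing" hd = true
        · rw [show bucketStep (w, t, b, c) hd = (w, t, b ++ [hd], c) from by unfold bucketStep; rw [if_neg h1, if_neg h2, if_pos h3],
            ih, show suitOf hd = 2 from by unfold suitOf; rw [if_neg h1, if_neg h2, if_pos h3]]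
          simp
        · rw [show bucketStep (w, t, b, c) hd = (w, t, b, c ++ [hd]) from by unfold bucketStep; rw [if_neg h1, if_neg h2, if_neg h3],
            ih, show suitOf hd = 3 from by unfold suitOf; rw [if_neg h1, if_neg h2, if_neg h3]]
          simp

-- the counting foldl of B
lemma counts_eq (lst : List String) (g : String) (s : Nat) (a b : Int) :
    lst.foldl (countStep s g) (a, b) =
    (a + (lst.filter (fun x => suitOf x == s)).length, b + lst.count g) := by
  induction lst generalizing a b with
  | nil => simp
  | cons hd tl ih =>
    simp only [List.foldl_cons, countStep, ih, List.filter_cons, List.count_cons]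
    by_cases h2 : hd = g
    · subst h2
      by_cases h1 : suitOf hd = s <;> simp [h1] <;> push_cast <;> omega
    · have h2' : ¬ g = hd := fun e => h2 e.symm
      by_cases h1 : suitOf hd = s <;> simp [h1, h2, h2', beq_iff_eq] <;> push_cast <;> omega

-- the seen-set loop is just 'any' over the bucket
lemma pengLoop_eq_any (cond : String → Bool) (rem : List String) (seen : PySem.Set String)
    (h : seen.any cond = false) : pengLoop cond rem seen = rem.any cond := by
  induction rem generalizing seen with
  | nil => simp [pengLoop]
  | cons w rest ih =>
    simp only [pengLoop, List.any_cons]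
    by_cases hc : PySem.Set.contains seen w = true
    · have hmem : w ∈ seen := (PySem.Set.contains_iff seen w).mp hc
      have hw : cond w = false := by
        cases hcw : cond w
        · rfl
        · exact absurd (List.any_eq_true.mpr ⟨w, hmem, hcw⟩) (by simp [h])
      simp only [PySem.Set.add, hc, if_true, h, hw, Bool.false_or]
      exact ih seen h
    · have hadd : PySem.Set.add seen w = seen ++ [w] := by
        unfold PySem.Set.add; rw [if_neg]; exact hc
      rw [hadd]
      cases hcw : cond w
      · have hfa : (seen ++ [w]).any cond = false := by simp [h, hcw]
        simp only [hfa, Bool.false_or, if_neg Bool.false_ne_true]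
        exact ih (seen ++ [w]) hfa
      · simp [h, hcw]

-- a wan/tiao block's 'any' collapses to a condition on givenTile itself
lemma block_core (bucket : List String) (g : String) (P : Bool) :
    (bucket.any fun i => (bucket.count i == 2) && P && (g == i)) =
    ((bucket.count g == 2) && P) := by
  rw [Bool.eq_iff_iff]
  simp only [List.any_eq_true, Bool.and_eq_true, beq_iff_eq]
  constructor
  · rintro ⟨i, _, ⟨hc, hP⟩, rfl⟩; exact ⟨hc, hP⟩
  · rintro ⟨hc, hP⟩
    exact ⟨g, List.count_pos_iff.mp (by omega), ⟨hc, hP⟩, rfl⟩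

-- the bing block (redundant second count test)
lemma block_bing (bucket : List String) (g : String) (P : Bool) :
    (bucket.any fun i => (bucket.count i == 2) && P && (g == i) && (bucket.count i == 2)) =
    ((bucket.count g == 2) && P) := by
  rw [Bool.eq_iff_iff]
  simp only [List.any_eq_true, Bool.and_eq_true, beq_iff_eq]
  constructor
  · rintro ⟨i, _, ⟨⟨hc, hP⟩, rfl⟩, _⟩; exact ⟨hc, hP⟩
  · rintro ⟨hc, hP⟩
    exact ⟨g, List.count_pos_iff.mp (by omega), ⟨⟨hc, hP⟩, rfl⟩, hc⟩

-- the character block (no substring test)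
lemma block_char (bucket : List String) (g : String) :
    (bucket.any fun i => (bucket.count i == 2) && (g == i)) = (bucket.count g == 2) := by
  rw [Bool.eq_iff_iff]
  simp only [List.any_eq_true, Bool.and_eq_true, beq_iff_eq]
  constructor
  · rintro ⟨i, _, hc, rfl⟩; exact hc
  · intro hc
    exact ⟨g, List.count_pos_iff.mp (by omega), hc, rfl⟩

-- count of g inside a suit-filtered bucket
lemma count_filter_suit (lst : List String) (g : String) (s : Nat) :
    (lst.filter (fun x => suitOf x == s)).count g =
    if suitOf g = s then lst.count g else 0 := by
  split_ifs with h
  · exact List.count_filter (by simp [h])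
  · apply List.count_eq_zero.mpr
    intro hmem
    exact h (by simpa using (List.mem_filter.mp hmem).2)

lemma suitOf_cases (g : String) : suitOf g = 0 ∨ suitOf g = 1 ∨ suitOf g = 2 ∨ suitOf g = 3 := by
  unfold suitOf; split_ifs <;> simp

lemma suitOf_zero (g : String) (h : suitOf g = 0) : PySem.Str.isIn "wan" g = true := by
  revert h; unfold suitOf; split_ifs <;> simp_all

lemma suitOf_one (g : String) (h : suitOf g = 1) : PySem.Str.isIn "tiao" g = true := by
  revert h; unfold suitOf; split_ifs <;> simp_all

lemma suitOf_two (g : String) (h : suitOf g = 2) : PySem.Str.isIn "bing" g = true := by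
  revert h; unfold suitOf; split_ifs <;> simp_all

-- decide on the Nat count versus BEq on B's Int copy count
lemma nat_int_beq_two (n : Nat) : decide (n = 2) = ((n : Int) == 2) := by
  by_cases h : n = 2 <;> simp [h, beq_iff_eq] <;> omega

-- ===== VERDICT (by name: the statement is the Claim_ definition above) =====
theorem ispeng_spec : Claim_equal_ispeng := by
  intro lst givenTile _
  unfold Spec_ispeng
  cases givenTile with
  | none => rfl
  | some g =>
    simp only [ispeng, ispeng_alt, buckets_eq, counts_eq, List.nil_append]
    unfold ispengCore
    rw [pengLoop_eq_any _ _ _ rfl, pengLoop_eq_any _ _ _ rfl,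
        pengLoop_eq_any _ _ _ rfl, pengLoop_eq_any _ _ _ rfl,
        block_core, block_core, block_bing, block_char,
        count_filter_suit, count_filter_suit, count_filter_suit, count_filter_suit]
    rcases suitOf_cases g with h | h | h | h
    · have hP := suitOf_zero g h
      simp only [h, if_pos rfl, hP, Bool.and_true]
      simp only [show (0:Nat) ≠ 1 from by omega, show (0:Nat) ≠ 2 from by omega,
        show (0:Nat) ≠ 3 from by omega, if_neg, if_false]
      simp [nat_int_beq_two]
    · have hP := suitOf_one g h
      simp only [h, if_pos rfl, hP, Bool.and_true]
      simp only [show (1:Nat) ≠ 0 from by omega, show (1:Nat) ≠ 2 from by omega,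
        show (1:Nat) ≠ 3 from by omega, if_neg, if_false]
      simp [nat_int_beq_two]
    · have hP := suitOf_two g h
      simp only [h, if_pos rfl, hP, Bool.and_true]
      simp only [show (2:Nat) ≠ 0 from by omega, show (2:Nat) ≠ 1 from by omega,
        show (2:Nat) ≠ 3 from by omega, if_neg, if_false]
      simp [nat_int_beq_two]
    · simp only [h, if_pos rfl]
      simp only [show (3:Nat) ≠ 0 from by omega, show (3:Nat) ≠ 1 from by omega,
        show (3:Nat) ≠ 2 from by omega, if_neg, if_false]
      simp [nat_int_beq_two]
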